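-- pv_equiv track=rewrite | github.com/MohitBurkule/challenges | multilangintent/eval_llm.py | match_intent
-- ===== SOURCE A (Python) =====
-- def match_intent(response: str, valid_intents: list) -> str:
--     """Match LLM response to a valid intent."""
--     response_clean = response.strip().lower().replace(" ", "_").replace("-", "_")
--
--     # Direct match
--     for intent in valid_intents:
--         if intent.lower() == response_clean:
--             return intent
--
--     # Partial match
--     for intent in valid_intents:
--         if response_clean in intent.lower() or intent.lower() in response_clean:
--             return intent
--
--     # Return first intent as fallback
--     return valid_intents[0]
-- ===== SOURCE B (Python) =====
-- def match_intent(response: str, valid_intents: list) -> str: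
--     """Match LLM response to a valid intent (single pass)."""
--     response_clean = response.strip().lower().replace(" ", "_").replace("-", "_")
--     partial = None
--     for intent in valid_intents:
--         il = intent.lower()
--         if il == response_clean:
--             return intent
--         if partial is None and (response_clean in il or il in response_clean):
--             partial = intent
--     return partial if partial is not None else valid_intents[0]
-- ===== Notes on version B (the rewrite author's own statement) =====
-- stated objective: alternative
-- what changed: Replaces A's two sequential scans (exact pass, then partial pass) by one scan that returns an exact match immediately and remembers only the first partial candidate, returned after the loop.
import Mathlib
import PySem

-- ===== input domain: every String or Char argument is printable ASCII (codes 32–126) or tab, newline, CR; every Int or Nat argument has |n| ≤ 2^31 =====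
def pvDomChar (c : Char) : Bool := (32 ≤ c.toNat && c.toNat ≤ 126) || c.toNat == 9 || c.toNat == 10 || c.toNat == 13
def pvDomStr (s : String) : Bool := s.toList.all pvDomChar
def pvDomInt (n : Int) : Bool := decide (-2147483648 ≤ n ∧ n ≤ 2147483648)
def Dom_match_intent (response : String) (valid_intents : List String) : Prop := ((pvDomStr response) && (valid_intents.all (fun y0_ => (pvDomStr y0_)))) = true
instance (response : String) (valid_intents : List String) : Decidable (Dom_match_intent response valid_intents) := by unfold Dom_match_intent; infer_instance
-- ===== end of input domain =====

-- B replaces A's two sequential scans by one scan that returns an exact match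
-- immediately and remembers the first partial candidate (objective: alternative decomposition).

-- ===== PORT A =====
-- A's first loop: return the first intent whose lowercase equals response_clean
def pvExactLoop (rc : String) : List String → Option String
  | [] => none
  | i :: t => if PySem.Str.lower i = rc then some i else pvExactLoop rc t

-- A's second loop: return the first intent with a partial (substring either way) match
def pvPartialLoop (rc : String) : List String → Option String
  | [] => none
  | i :: t =>
    if PySem.Str.isIn rc (PySem.Str.lower i) || PySem.Str.isIn (PySem.Str.lower i) rc then some i
    else pvPartialLoop rc t

-- response_clean = response.strip().lower().replace(" ", "_").replace("-", "_")  (shared by both ports' source texts)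
def pvClean (response : String) : String :=
  PySem.Str.replace (PySem.Str.replace (PySem.Str.lower (PySem.Str.strip response)) " " "_") "-" "_"

def match_intent (response : String) (valid_intents : List String) : String :=
  match pvExactLoop (pvClean response) valid_intents with
  | some i => i
  | none =>
    match pvPartialLoop (pvClean response) valid_intents with
    | some i => i
    | none => (PySem.List.pyGet? valid_intents 0).getD ""  -- valid_intents[0]; IndexError (excluded by Pre_) when empty

-- ===== PORT B =====
-- B's single loop: exact match returns at once; the first partial candidate is stored in p
def pvScanLoop (rc : String) : List String → Option String → Option String
  | [], p => p
  | i :: t, p =>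
    let il := PySem.Str.lower i
    if il = rc then some i
    else pvScanLoop rc t
      (if p.isNone && (PySem.Str.isIn rc il || PySem.Str.isIn il rc) then some i else p)

def match_intent_alt (response : String) (valid_intents : List String) : String :=
  match pvScanLoop (pvClean response) valid_intents none with
  | some i => i
  | none => (PySem.List.pyGet? valid_intents 0).getD ""  -- valid_intents[0]; IndexError (excluded by Pre_) when empty

-- ===== PRECONDITION & SPEC =====
-- Pre_ excludes only the empty intent list, on which both Pythons raise IndexError at valid_intents[0].
def Pre_match_intent (response : String) (valid_intents : List String) : Prop := valid_intents ≠ []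
instance (response : String) (valid_intents : List String) : Decidable (Pre_match_intent response valid_intents) := by unfold Pre_match_intent; infer_instance
def pvWitness_match_intent : String × List String := ("Greet ", ["greet", "bye"])

def Spec_match_intent (response : String) (valid_intents : List String) (out : String) : Prop := out = match_intent_alt response valid_intents
instance (response : String) (valid_intents : List String) (out : String) : Decidable (Spec_match_intent response valid_intents out) := by unfold Spec_match_intent; infer_instance

-- ===== CLAIM (what is proved, stated in full; the proofs are below) =====
def Claim_equal_match_intent : Prop := ∀ (response : String) (valid_intents : List String), Dom_match_intent response valid_intents → Pre_match_intent response valid_intents → Spec_match_intent response valid_intents (match_intent response valid_intents)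

-- ===== LEMMAS AND PROOFS =====

-- B's single scan equals A's exact scan, else the stored candidate, else A's partial scan
theorem pvScanLoop_eq (rc : String) (l : List String) (p : Option String) :
    pvScanLoop rc l p = (pvExactLoop rc l).or (p.or (pvPartialLoop rc l)) := by
  induction l generalizing p with
  | nil => simp [pvScanLoop, pvExactLoop, pvPartialLoop]
  | cons i t ih =>
    simp only [pvScanLoop, pvExactLoop, pvPartialLoop, ih]
    cases p <;> split_ifs <;> simp_all

-- ===== VERDICT (by name: the statement is the Claim_ definition above) =====
theorem match_intent_spec : Claim_equal_match_intent := by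
  intro response valid_intents _ _
  unfold Spec_match_intent match_intent match_intent_alt
  rw [pvScanLoop_eq]
  cases pvExactLoop _ valid_intents <;> cases pvPartialLoop _ valid_intents <;> simp [Option.or]
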